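-- pv_equiv track=rewrite | github.com/hanno79/AgentSmith | dependency_merger.py | _merge_deps
-- ===== SOURCE A (Python) =====
-- def _merge_deps(existing: dict, new: dict, pinned: dict) -> dict:
--     """
--     Merged zwei Dependency-Dicts mit Versions-Prioritaet: pinned > existierend > neu.
--
--     Entfernt ^ und ~ Prefixe (konsistent mit Fix 16 Version-Normalisierung).
--     """
--     merged = {}
--
--     # Alle Packages aus beiden Quellen sammeln
--     all_packages = set(list(existing.keys()) + list(new.keys()))
--
--     for pkg in sorted(all_packages):
--         if pkg in pinned:
--             # Hoechste Prioritaet: Gepinnte Version aus Template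
--             merged[pkg] = str(pinned[pkg]).lstrip("^~")
--         elif pkg in existing:
--             # Zweite Prioritaet: Existierende Version (Template)
--             merged[pkg] = str(existing[pkg]).lstrip("^~")
--         else:
--             # Dritte Prioritaet: Coder-Version (neue Dependency)
--             merged[pkg] = str(new[pkg]).lstrip("^~")
--
--     return merged
-- ===== SOURCE B (Python) =====
-- def _merge_deps(existing: dict, new: dict, pinned: dict) -> dict:
--     """Merge by successive overrides: start from new, overwrite with existing,
--     then overwrite already-present keys with pinned; sort keys at the end."""
--     merged = {k: str(v).lstrip("^~") for k, v in new.items()}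
--     for k, v in existing.items():
--         merged[k] = str(v).lstrip("^~")
--     for k in list(merged.keys()):
--         if k in pinned:
--             merged[k] = str(pinned[k]).lstrip("^~")
--     return dict(sorted(merged.items()))
-- ===== Notes on version B (the rewrite author's own statement) =====
-- stated objective: alternative
-- what changed: Instead of selecting per key from a sorted union with a 3-way priority chain, B builds the result by successive dict overrides (normalized new, overwritten by normalized existing, then pinned applied only to keys already present) and sorts the items once at the end.
import Mathlib
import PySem

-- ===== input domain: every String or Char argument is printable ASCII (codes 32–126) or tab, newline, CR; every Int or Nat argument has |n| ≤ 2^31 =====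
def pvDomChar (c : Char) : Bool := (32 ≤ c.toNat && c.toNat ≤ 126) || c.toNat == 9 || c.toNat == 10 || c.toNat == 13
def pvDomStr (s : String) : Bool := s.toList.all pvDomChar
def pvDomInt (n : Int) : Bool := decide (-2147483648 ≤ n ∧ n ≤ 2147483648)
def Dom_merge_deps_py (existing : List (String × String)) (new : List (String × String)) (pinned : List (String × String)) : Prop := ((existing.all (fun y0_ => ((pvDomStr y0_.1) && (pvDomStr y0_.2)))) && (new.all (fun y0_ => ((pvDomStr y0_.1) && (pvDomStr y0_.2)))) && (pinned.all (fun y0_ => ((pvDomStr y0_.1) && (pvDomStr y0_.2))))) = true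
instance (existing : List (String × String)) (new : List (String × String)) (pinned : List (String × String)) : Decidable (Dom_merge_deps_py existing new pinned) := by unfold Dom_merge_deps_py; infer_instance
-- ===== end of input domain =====

-- B merges by successive dict overrides (new, then existing, then pinned on present keys) with one final sort,
-- instead of A's per-key 3-way priority selection over the sorted key union; same cost, alternative decomposition.

-- shared helper: hand port of Python's str(v).lstrip("^~") — exact: drops the leading run of '^'/'~' characters
def pvLstripCarets (s : String) : String :=
  String.ofList (s.toList.dropWhile (fun c => c == '^' || c == '~'))

-- ===== PORT A =====
def merge_deps_py (existing : List (String × String)) (new : List (String × String)) (pinned : List (String × String)) : List (String × String) :=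
  let ex := PySem.Dict.mk existing
  let nw := PySem.Dict.mk new
  let pn := PySem.Dict.mk pinned
  -- all_packages = set(list(existing.keys()) + list(new.keys()))
  let all_packages : PySem.Set String := PySem.Set.ofList (ex.keys ++ nw.keys)
  -- for pkg in sorted(all_packages): merged[pkg] = … (pn[pkg] / ex[pkg] / nw[pkg] exist under the guards, so getD "" is exact)
  let merged : PySem.Dict String String :=
    (PySem.List.sorted all_packages (fun x => x)).foldl
      (fun m pkg =>
        if pn.contains pkg then m.insert pkg (pvLstripCarets (pn.getD pkg ""))
        else if ex.contains pkg then m.insert pkg (pvLstripCarets (ex.getD pkg ""))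
        else m.insert pkg (pvLstripCarets (nw.getD pkg "")))
      PySem.Dict.empty
  merged.items

-- ===== PORT B =====
def merge_deps_py_alt (existing : List (String × String)) (new : List (String × String)) (pinned : List (String × String)) : List (String × String) :=
  let pn := PySem.Dict.mk pinned
  -- merged = {k: norm(v) for k, v in new.items()}
  let m1 := new.foldl (fun (m : PySem.Dict String String) kv => m.insert kv.1 (pvLstripCarets kv.2)) PySem.Dict.empty
  -- for k, v in existing.items(): merged[k] = norm(v)
  let m2 := existing.foldl (fun m kv => m.insert kv.1 (pvLstripCarets kv.2)) m1
  -- for k in list(merged.keys()): if k in pinned: merged[k] = norm(pinned[k])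
  let m3 := m2.keys.foldl (fun m k => if pn.contains k then m.insert k (pvLstripCarets (pn.getD k "")) else m) m2
  -- dict(sorted(merged.items()))
  PySem.List.sorted2 m3.items (fun p => p.1) (fun p => p.2)

-- ===== PRECONDITION & SPEC =====
-- The Python arguments are dicts, whose keys are necessarily distinct; Pre_ restricts the association-list
-- encoding to exactly those lists (a duplicate-key list encodes no Python dict, so A never runs on one).
def Pre_merge_deps_py (existing : List (String × String)) (new : List (String × String)) (pinned : List (String × String)) : Prop :=
  (existing.map Prod.fst).Nodup ∧ (new.map Prod.fst).Nodup ∧ (pinned.map Prod.fst).Nodup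
instance (existing : List (String × String)) (new : List (String × String)) (pinned : List (String × String)) : Decidable (Pre_merge_deps_py existing new pinned) := by unfold Pre_merge_deps_py; infer_instance
def pvWitness_merge_deps_py : (List (String × String)) × (List (String × String)) × (List (String × String)) :=
  ([("b", "^1.0"), ("a", "~2.0")], [("c", "^3"), ("a", "4")], [("a", "~5")])

def Spec_merge_deps_py (existing : List (String × String)) (new : List (String × String)) (pinned : List (String × String)) (out : List (String × String)) : Prop := out = merge_deps_py_alt existing new pinned
instance (existing : List (String × String)) (new : List (String × String)) (pinned : List (String × String)) (out : List (String × String)) : Decidable (Spec_merge_deps_py existing new pinned out) := by unfold Spec_merge_deps_py; infer_instance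

-- ===== CLAIM (what is proved, stated in full; the proofs are below) =====
def Claim_equal_merge_deps_py : Prop := ∀ (existing : List (String × String)) (new : List (String × String)) (pinned : List (String × String)), Dom_merge_deps_py existing new pinned → Pre_merge_deps_py existing new pinned → Spec_merge_deps_py existing new pinned (merge_deps_py existing new pinned)

-- ===== LEMMAS AND PROOFS =====

def pvPick (existing new pinned : List (String × String)) (k : String) : String :=
  if (PySem.Dict.mk pinned).contains k then pvLstripCarets ((PySem.Dict.mk pinned).getD k "")
  else if (PySem.Dict.mk existing).contains k then pvLstripCarets ((PySem.Dict.mk existing).getD k "")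
  else pvLstripCarets ((PySem.Dict.mk new).getD k "")

lemma pv_get?_foldl_insert (l : List (String × String)) (d : PySem.Dict String String)
    (h : (l.map Prod.fst).Nodup) (k : String) :
    (l.foldl (fun m kv => m.insert kv.1 (pvLstripCarets kv.2)) d).get? k
      = (((PySem.Dict.mk l).get? k).map pvLstripCarets).or (d.get? k) := by
  induction l generalizing d with
  | nil => simp [PySem.Dict.get?]
  | cons kv l ih =>
    obtain ⟨k1, v1⟩ := kv
    simp only [List.map_cons, List.nodup_cons] at h
    simp only [List.foldl_cons]
    rw [ih _ h.2]
    by_cases hk : k = k1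
    · subst hk
      have hnone : (PySem.Dict.mk l).get? k = none := by
        rw [PySem.Dict.get?_eq_none_iff_not_mem_keys]
        simpa [PySem.Dict.keys_mk] using h.1
      simp [hnone, PySem.Dict.get?_insert_self, PySem.Dict.get?_mk_cons]
    · rw [PySem.Dict.get?_insert_of_ne _ _ hk]
      have hne : (k1 == k) = false := by simpa using Ne.symm hk
      simp [PySem.Dict.get?_mk_cons, hne]

lemma pv_get?_pinned_pass (ks : List String) (pn : PySem.Dict String String)
    (m : PySem.Dict String String) (k : String) :
    (ks.foldl (fun m k' => if pn.contains k' then m.insert k' (pvLstripCarets (pn.getD k' "")) else m) m).get? k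
      = if pn.contains k = true ∧ k ∈ ks then some (pvLstripCarets (pn.getD k "")) else m.get? k := by
  induction ks generalizing m with
  | nil => simp
  | cons a ks ih =>
    simp only [List.foldl_cons]
    by_cases hc : pn.contains a = true
    · rw [if_pos hc, ih]
      by_cases hmem : pn.contains k = true ∧ k ∈ ks
      · rw [if_pos hmem, if_pos ⟨hmem.1, List.mem_cons_of_mem _ hmem.2⟩]
      · rw [if_neg hmem]
        by_cases hk : k = a
        · subst hk
          rw [PySem.Dict.get?_insert_self, if_pos ⟨hc, List.mem_cons_self ..⟩]
        · rw [PySem.Dict.get?_insert_of_ne _ _ hk]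
          have hnc : ¬(pn.contains k = true ∧ k ∈ a :: ks) := by
            rintro ⟨h1, h2⟩
            rcases List.mem_cons.1 h2 with h | h
            · exact hk h
            · exact hmem ⟨h1, h⟩
          rw [if_neg hnc]
    · rw [if_neg hc, ih]
      by_cases hmem : pn.contains k = true ∧ k ∈ ks
      · rw [if_pos hmem, if_pos ⟨hmem.1, List.mem_cons_of_mem _ hmem.2⟩]
      · rw [if_neg hmem]
        have hnc : ¬(pn.contains k = true ∧ k ∈ a :: ks) := by
          rintro ⟨h1, h2⟩
          rcases List.mem_cons.1 h2 with h | h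
          · subst h; exact hc h1
          · exact hmem ⟨h1, h⟩
        rw [if_neg hnc]

lemma pv_keys_pinned_pass (ks : List String) (pn : PySem.Dict String String)
    (m : PySem.Dict String String) (h : ∀ a ∈ ks, a ∈ m.keys) :
    (ks.foldl (fun m k' => if pn.contains k' then m.insert k' (pvLstripCarets (pn.getD k' "")) else m) m).keys
      = m.keys := by
  induction ks generalizing m with
  | nil => simp
  | cons a ks ih =>
    simp only [List.foldl_cons]
    by_cases hc : pn.contains a = true
    · rw [if_pos hc]
      have hkeys := PySem.Dict.keys_insert_of_contains m (pvLstripCarets (pn.getD a ""))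
        ((PySem.Dict.contains_iff_mem_keys m a).2 (h a (by simp)))
      rw [ih _ (by intro b hb; rw [hkeys]; exact h b (by simp [hb])), hkeys]
    · rw [if_neg hc]
      exact ih _ (fun b hb => h b (by simp [hb]))

lemma pv_insertBy_congr {α : Type} (bf bf' : α → α → Bool) (x : α) (acc : List α)
    (h : ∀ b ∈ acc, bf x b = bf' x b) :
    PySem.List.insertBy bf x acc = PySem.List.insertBy bf' x acc := by
  induction acc with
  | nil => rfl
  | cons y ys ih =>
    simp only [PySem.List.insertBy]
    rw [h y (by simp)]
    by_cases hb : bf' x y = true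
    · simp [hb]
    · simp only [Bool.not_eq_true] at hb
      simp [hb, ih (fun b hb' => h b (by simp [hb']))]

lemma pv_sorted2_eq_sorted {α : Type} (xs : List α) (k1 k2 : α → String)
    (h : (xs.map k1).Nodup) :
    PySem.List.sorted2 xs k1 k2 = PySem.List.sorted xs k1 := by
  show xs.foldl (fun acc x => PySem.List.insertBy
      (fun a b => decide (k1 a < k1 b) || (!decide (k1 b < k1 a) && decide (k2 a < k2 b))) x acc) []
    = xs.foldl (fun acc x => PySem.List.insertBy (fun a b => decide (k1 a < k1 b)) x acc) []
  have main : ∀ (l : List α) (acc : List α), (l.map k1).Nodup →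
      (∀ a ∈ l, ∀ b ∈ acc, k1 a ≠ k1 b) →
      l.foldl (fun acc x => PySem.List.insertBy
        (fun a b => decide (k1 a < k1 b) || (!decide (k1 b < k1 a) && decide (k2 a < k2 b))) x acc) acc
      = l.foldl (fun acc x => PySem.List.insertBy (fun a b => decide (k1 a < k1 b)) x acc) acc := by
    intro l
    induction l with
    | nil => intro acc _ _; rfl
    | cons x l ih =>
      intro acc hnd hsep
      simp only [List.map_cons, List.nodup_cons] at hnd
      simp only [List.foldl_cons]
      have hx : PySem.List.insertBy
          (fun a b => decide (k1 a < k1 b) || (!decide (k1 b < k1 a) && decide (k2 a < k2 b))) x acc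
          = PySem.List.insertBy (fun a b => decide (k1 a < k1 b)) x acc := by
        apply pv_insertBy_congr
        intro b hb
        have hne : k1 x ≠ k1 b := hsep x (by simp) b hb
        rcases lt_trichotomy (k1 x) (k1 b) with hlt | heq | hgt
        · simp [hlt]
        · exact absurd heq hne
        · simp [hgt, not_lt_of_gt hgt]
      rw [hx]
      apply ih _ hnd.2
      intro a ha b hb
      rw [PySem.List.mem_insertBy] at hb
      rcases hb with rfl | hb
      · exact fun he => hnd.1 (by rw [← he] at *; exact List.mem_map_of_mem ha)
      · exact hsep a (by simp [ha]) b hb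
  exact main xs [] h (by simp)

lemma pv_sorted2_eq_of_perm_of_pairwise_lt {α : Type} (xs ys : List α) (k1 k2 : α → String)
    (hperm : ys.Perm xs) (hp : ys.Pairwise (fun a b => k1 a < k1 b)) :
    PySem.List.sorted2 xs k1 k2 = ys := by
  have hndy : (ys.map k1).Nodup := by
    have : (ys.map k1).Pairwise (· < ·) := List.pairwise_map.2 hp
    exact this.imp (fun h => LT.lt.ne h)
  have hndx : (xs.map k1).Nodup := ((hperm.map k1).nodup_iff).1 hndy
  rw [pv_sorted2_eq_sorted xs k1 k2 hndx]
  exact PySem.List.sorted_eq_of_perm_of_pairwise_lt xs ys k1 hperm hp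

lemma pv_A_items (existing new pinned : List (String × String)) :
    merge_deps_py existing new pinned =
      (PySem.List.sorted (PySem.Set.ofList (existing.map Prod.fst ++ new.map Prod.fst)) (fun x => x)).map
        (fun k => (k, pvPick existing new pinned k)) := by
  simp only [merge_deps_py, PySem.Dict.keys_mk]
  have hstep : (fun (m : PySem.Dict String String) pkg =>
        if (PySem.Dict.mk pinned).contains pkg then m.insert pkg (pvLstripCarets ((PySem.Dict.mk pinned).getD pkg ""))
        else if (PySem.Dict.mk existing).contains pkg then m.insert pkg (pvLstripCarets ((PySem.Dict.mk existing).getD pkg ""))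
        else m.insert pkg (pvLstripCarets ((PySem.Dict.mk new).getD pkg "")))
      = (fun (m : PySem.Dict String String) pkg => m.insert pkg (pvPick existing new pinned pkg)) := by
    funext m pkg
    simp only [pvPick]
    split_ifs <;> rfl
  rw [hstep]
  have hnd : ((PySem.List.sorted (PySem.Set.ofList (List.map Prod.fst existing ++ List.map Prod.fst new)) (fun x => x)).map (fun x => x)).Nodup := by
    simp only [List.map_id']
    exact (PySem.List.sorted_ofList_pairwise_lt _).imp (fun h => LT.lt.ne h)
  have := PySem.Dict.items_foldl_insert_fresh
    (PySem.List.sorted (PySem.Set.ofList (List.map Prod.fst existing ++ List.map Prod.fst new)) (fun x => x))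
    (fun x => x) (pvPick existing new pinned) PySem.Dict.empty
    (fun a _ => PySem.Dict.contains_empty a) hnd
  simpa using this

lemma pv_main (existing new pinned : List (String × String))
    (hpre : (existing.map Prod.fst).Nodup ∧ (new.map Prod.fst).Nodup ∧ (pinned.map Prod.fst).Nodup) :
    merge_deps_py existing new pinned = merge_deps_py_alt existing new pinned := by
  obtain ⟨hE, hN, hP⟩ := hpre
  rw [pv_A_items]
  simp only [merge_deps_py_alt]
  set P := PySem.Dict.mk pinned with hPdef
  set m1 := new.foldl (fun (m : PySem.Dict String String) kv => m.insert kv.1 (pvLstripCarets kv.2)) PySem.Dict.empty with hm1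
  set m2 := existing.foldl (fun m kv => m.insert kv.1 (pvLstripCarets kv.2)) m1 with hm2
  set m3 := m2.keys.foldl (fun m k => if P.contains k then m.insert k (pvLstripCarets (P.getD k "")) else m) m2 with hm3
  set S := PySem.List.sorted (PySem.Set.ofList (existing.map Prod.fst ++ new.map Prod.fst)) (fun x => x) with hS
  set g := fun k => (k, pvPick existing new pinned k) with hg
  -- keys bookkeeping
  have hm1keys : m1.keys = PySem.Set.ofList (new.map Prod.fst) := by
    rw [hm1, PySem.Dict.keys_foldl_insert_key new (fun kv => kv.1) (fun _ kv => pvLstripCarets kv.2)]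
    simp [PySem.Set.update_nil_left]
  have hm2keys : m2.keys = PySem.Set.update (PySem.Set.ofList (new.map Prod.fst)) (existing.map Prod.fst) := by
    rw [hm2, PySem.Dict.keys_foldl_insert_key existing (fun kv => kv.1) (fun _ kv => pvLstripCarets kv.2), hm1keys]
  have hm2nd : m2.keys.Nodup := by
    rw [hm2keys]; exact PySem.Set.nodup_update _ _ (PySem.Set.nodup_ofList _)
  have hm3keys : m3.keys = m2.keys := pv_keys_pinned_pass m2.keys P m2 (fun a ha => ha)
  have hm2mem : ∀ k, k ∈ m2.keys ↔ k ∈ existing.map Prod.fst ∨ k ∈ new.map Prod.fst := by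
    intro k
    rw [hm2keys, PySem.Set.mem_update, PySem.Set.mem_ofList]
    tauto
  have hSmem : ∀ k, k ∈ S ↔ k ∈ existing.map Prod.fst ∨ k ∈ new.map Prod.fst := by
    intro k
    rw [hS, PySem.List.mem_sorted, PySem.Set.mem_ofList, List.mem_append]
  have hSpair : S.Pairwise (· < ·) := PySem.List.sorted_ofList_pairwise_lt _
  have hSnd : S.Nodup := hSpair.imp (fun h => LT.lt.ne h)
  have hpermkeys : S.Perm m3.keys := by
    rw [hm3keys]
    exact (List.perm_ext_iff_of_nodup hSnd hm2nd).2 (fun a => (hSmem a).trans (hm2mem a).symm)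
  -- values
  have hget : ∀ k ∈ m2.keys, m3.get? k = some (pvPick existing new pinned k) := by
    intro k hk
    rw [hm3, pv_get?_pinned_pass]
    by_cases hc : P.contains k = true
    · rw [if_pos ⟨hc, hk⟩, pvPick, if_pos hc]
    · rw [if_neg (by tauto), hm2, pv_get?_foldl_insert existing m1 hE k,
        hm1, pv_get?_foldl_insert new PySem.Dict.empty hN k]
      simp only [PySem.Dict.get?_empty, Option.or_none]
      rw [pvPick, if_neg hc]
      rcases hoE : (PySem.Dict.mk existing).get? k with _ | v
      · have hkE : k ∉ existing.map Prod.fst := by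
          have := (PySem.Dict.get?_eq_none_iff_not_mem_keys (PySem.Dict.mk existing) k).1 hoE
          simpa [PySem.Dict.keys_mk] using this
        have hkN : k ∈ new.map Prod.fst := by
          rcases (hm2mem k).1 hk with h | h
          · exact absurd h hkE
          · exact h
        have hcontE : (PySem.Dict.mk existing).contains k = false := by
          rw [PySem.Dict.contains_eq_isSome_get?, hoE]; rfl
        rcases hoN : (PySem.Dict.mk new).get? k with _ | w
        · exact absurd ((PySem.Dict.get?_eq_none_iff_not_mem_keys _ _).1 hoN)
            (by simpa [PySem.Dict.keys_mk] using hkN)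
        · rw [if_neg (by simp [hcontE]), PySem.Dict.getD_eq_get?_getD, hoN]
          simp
      · have hcontE : (PySem.Dict.mk existing).contains k = true := by
          rw [PySem.Dict.contains_eq_isSome_get?, hoE]; rfl
        rw [if_pos hcontE, PySem.Dict.getD_eq_get?_getD, hoE]
        simp
  have hitems : m3.items = m3.keys.map g := by
    rw [PySem.Dict.items_eq_map_keys m3 (hm3keys ▸ hm2nd) ""]
    apply List.map_congr_left
    intro k hk
    rw [hg]
    have := hget k (hm3keys ▸ hk)
    rw [PySem.Dict.getD_eq_get?_getD, this]
    rfl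
  -- finish
  have hpair : (S.map g).Pairwise (fun a b => a.1 < b.1) := by
    rw [List.pairwise_map]
    exact hSpair
  have hperm : (S.map g).Perm (m3.items) := by
    rw [hitems]
    exact hpermkeys.map g
  exact (pv_sorted2_eq_of_perm_of_pairwise_lt m3.items (S.map g) (fun p => p.1) (fun p => p.2) hperm hpair).symm

-- ===== VERDICT (by name: the statement is the Claim_ definition above) =====
theorem merge_deps_py_spec : Claim_equal_merge_deps_py := by
  intro existing new pinned _hdom hpre
  exact pv_main existing new pinned hpre
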